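-- pv_equiv track=rewrite | github.com/nazbeer/astraea-ai-platform | backend/app/matching.py | _skill_matches
-- ===== SOURCE A (Python) =====
-- def _skill_matches(job_skill: str, resume_skill: str) -> bool:
--     """Check if a resume skill matches a job skill (with fuzzy matching)."""
--     job_skill = job_skill.lower().strip()
--     resume_skill = resume_skill.lower().strip()
--
--     # Exact match
--     if job_skill == resume_skill:
--         return True
--
--     # Contains match
--     if job_skill in resume_skill or resume_skill in job_skill:
--         return True
--
--     # Common variations
--     variations = {
--         'javascript': ['js', 'ecmascript'],
--         'typescript': ['ts'],
--         'python': ['py'],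
--         'react': ['reactjs', 'react.js'],
--         'node': ['nodejs', 'node.js'],
--         'aws': ['amazon web services'],
--         'gcp': ['google cloud platform', 'google cloud'],
--         'azure': ['microsoft azure'],
--         'machine learning': ['ml'],
--         'artificial intelligence': ['ai'],
--         'user interface': ['ui'],
--         'user experience': ['ux'],
--     }
--
--     for main, alts in variations.items():
--         all_forms = [main] + alts
--         if job_skill in all_forms and resume_skill in all_forms:
--             return True
--
--     return False
-- ===== SOURCE B (Python) =====
-- _VARIATIONS = {
--     'javascript': ['js', 'ecmascript'],
--     'typescript': ['ts'],
--     'python': ['py'],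
--     'react': ['reactjs', 'react.js'],
--     'node': ['nodejs', 'node.js'],
--     'aws': ['amazon web services'],
--     'gcp': ['google cloud platform', 'google cloud'],
--     'azure': ['microsoft azure'],
--     'machine learning': ['ml'],
--     'artificial intelligence': ['ai'],
--     'user interface': ['ui'],
--     'user experience': ['ux'],
-- }
--
-- # Reverse index: every form (main key or alternative) -> its canonical group key.
-- _GROUP = {form: main for main, alts in _VARIATIONS.items() for form in [main, *alts]}
--
--
-- def _skill_matches(job_skill: str, resume_skill: str) -> bool:
--     """Check if a resume skill matches a job skill (with fuzzy matching)."""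
--     job_skill = job_skill.lower().strip()
--     resume_skill = resume_skill.lower().strip()
--
--     # Substring match (covers the exact match: every string contains itself).
--     if job_skill in resume_skill or resume_skill in job_skill:
--         return True
--
--     # Variation match: both skills map to the same canonical group.
--     group = _GROUP.get(job_skill)
--     return group is not None and group == _GROUP.get(resume_skill)
-- ===== Notes on version B (the rewrite author's own statement) =====
-- stated objective: simpler
-- what changed: The exact-match branch is dropped (substring containment already covers equality) and the per-call loop over variation groups is replaced by a module-level reverse index mapping every form to its canonical group key, so the function becomes two dict lookups compared for equality (guarded against both being None).
import Mathlib
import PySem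

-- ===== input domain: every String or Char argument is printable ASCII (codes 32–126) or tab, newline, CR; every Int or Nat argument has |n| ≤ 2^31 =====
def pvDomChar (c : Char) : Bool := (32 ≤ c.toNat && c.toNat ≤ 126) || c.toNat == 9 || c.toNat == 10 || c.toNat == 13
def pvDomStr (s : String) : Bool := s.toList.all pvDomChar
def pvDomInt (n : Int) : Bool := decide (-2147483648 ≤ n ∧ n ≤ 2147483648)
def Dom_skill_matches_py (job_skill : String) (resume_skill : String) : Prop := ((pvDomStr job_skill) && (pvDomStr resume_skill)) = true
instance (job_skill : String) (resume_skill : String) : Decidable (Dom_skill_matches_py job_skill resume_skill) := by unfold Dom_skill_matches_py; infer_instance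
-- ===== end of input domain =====

-- B drops the redundant exact-match branch (substring containment covers it) and replaces
-- the per-call loop over variation groups by a precomputed reverse index (form -> group key);
-- objective: simpler.


-- the 'variations' table (the same literal appears in both Pythons)
def pvVariations : List (String × List String) :=
  [("javascript", ["js", "ecmascript"]),
   ("typescript", ["ts"]),
   ("python", ["py"]),
   ("react", ["reactjs", "react.js"]),
   ("node", ["nodejs", "node.js"]),
   ("aws", ["amazon web services"]),
   ("gcp", ["google cloud platform", "google cloud"]),
   ("azure", ["microsoft azure"]),
   ("machine learning", ["ml"]),
   ("artificial intelligence", ["ai"]),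
   ("user interface", ["ui"]),
   ("user experience", ["ux"])]

-- ===== PORT A =====
-- A's final 'for main, alts in variations.items(): …' loop with its early return
-- (p.1 = main, p.2 = alts)
def pvVarLoop : List (String × List String) → String → String → Bool
  | [], _, _ => false
  | p :: rest, job_skill, resume_skill =>
    let all_forms := p.1 :: p.2
    if all_forms.contains job_skill && all_forms.contains resume_skill then true
    else pvVarLoop rest job_skill resume_skill

def skill_matches_py (job_skill : String) (resume_skill : String) : Bool :=
  let job_skill := PySem.Str.strip (PySem.Str.lower job_skill)
  let resume_skill := PySem.Str.strip (PySem.Str.lower resume_skill)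
  -- Exact match
  if job_skill == resume_skill then true
  -- Contains match
  else if PySem.Str.isIn job_skill resume_skill || PySem.Str.isIn resume_skill job_skill then true
  -- Common variations
  else pvVarLoop pvVariations job_skill resume_skill

-- ===== PORT B =====
-- Source B's module-level reverse index _GROUP = {form: main for main, alts in … for form in [main, *alts]}
-- (all keys are distinct, so the dict is this association list in comprehension order; .get = first match)
def pvGroup : List (String × String) :=
  pvVariations.flatMap (fun p => (p.1 :: p.2).map (fun f => (f, p.1)))

def skill_matches_py_alt (job_skill : String) (resume_skill : String) : Bool :=
  let j := PySem.Str.strip (PySem.Str.lower job_skill)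
  let r := PySem.Str.strip (PySem.Str.lower resume_skill)
  -- Substring match (covers the exact match)
  if PySem.Str.isIn j r || PySem.Str.isIn r j then true
  else
    -- group = _GROUP.get(j); return group is not None and group == _GROUP.get(r)
    match List.lookup j pvGroup with
    | none => false
    | some g => List.lookup r pvGroup == some g

-- ===== PRECONDITION & SPEC =====
def Spec_skill_matches_py (job_skill : String) (resume_skill : String) (out : Bool) : Prop := out = skill_matches_py_alt job_skill resume_skill
instance (job_skill : String) (resume_skill : String) (out : Bool) : Decidable (Spec_skill_matches_py job_skill resume_skill out) := by unfold Spec_skill_matches_py; infer_instance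

-- ===== CLAIM (what is proved, stated in full; the proofs are below) =====
def Claim_equal_skill_matches_py : Prop := ∀ (job_skill : String) (resume_skill : String), Dom_skill_matches_py job_skill resume_skill → Spec_skill_matches_py job_skill resume_skill (skill_matches_py job_skill resume_skill)

-- ===== LEMMAS AND PROOFS =====

-- the forms of one variation group
def pvForms (p : String × List String) : List String := p.1 :: p.2

-- the reverse-index segment one group contributes
def pvSeg (p : String × List String) : List (String × String) := (pvForms p).map (fun f => (f, p.1))

-- lookup in a constant-valued mapped segment: hit
theorem pv_lookup_seg_mem (l : List String) (c : String) (rest : List (String × String)) (x : String)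
    (hx : x ∈ l) : List.lookup x (l.map (fun f => (f, c)) ++ rest) = some c := by
  induction l with
  | nil => cases hx
  | cons a t ih =>
    by_cases hax : x = a
    · simp [hax]
    · rcases List.mem_cons.mp hx with h | h
      · exact absurd h hax
      · rw [List.map_cons, List.cons_append]
        simp only [List.lookup_cons, beq_eq_false_iff_ne.mpr hax]
        exact ih h

-- lookup in a constant-valued mapped segment: miss
theorem pv_lookup_seg_not_mem (l : List String) (c : String) (rest : List (String × String)) (x : String)
    (hx : x ∉ l) : List.lookup x (l.map (fun f => (f, c)) ++ rest) = List.lookup x rest := by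
  induction l with
  | nil => simp
  | cons a t ih =>
    have hax : x ≠ a := fun h => hx (h ▸ List.mem_cons_self ..)
    have ht : x ∉ t := fun h => hx (List.mem_cons_of_mem _ h)
    rw [List.map_cons, List.cons_append]
    simp only [List.lookup_cons, beq_eq_false_iff_ne.mpr hax]
    exact ih ht

-- any value returned by a lookup in the reverse index of V is a form of V
theorem pv_lookup_val_mem (V : List (String × List String)) (x k : String)
    (h : List.lookup x (V.flatMap pvSeg) = some k) : k ∈ V.flatMap pvForms := by
  induction V with
  | nil => simp at h
  | cons g t ih =>
    rw [List.flatMap_cons] at h ⊢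
    by_cases hx : x ∈ pvForms g
    · rw [show pvSeg g = (pvForms g).map (fun f => (f, g.1)) from rfl,
          pv_lookup_seg_mem _ _ _ _ hx] at h
      exact List.mem_append_left _ (Option.some.inj h ▸ List.mem_cons_self ..)
    · rw [show pvSeg g = (pvForms g).map (fun f => (f, g.1)) from rfl,
          pv_lookup_seg_not_mem _ _ _ _ hx] at h
      exact List.mem_append_right _ (ih h)

-- A's loop returns false when the first argument is no form of any group
theorem pv_varLoop_false_left (V : List (String × List String)) (j r : String)
    (hj : j ∉ V.flatMap pvForms) : pvVarLoop V j r = false := by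
  induction V with
  | nil => rfl
  | cons g t ih =>
    rw [List.flatMap_cons] at hj
    have h1 : (pvForms g).contains j = false := by
      simp only [List.contains_eq_mem, decide_eq_false_iff_not]
      exact fun h => hj (List.mem_append_left _ h)
    have h2 : j ∉ t.flatMap pvForms := fun h => hj (List.mem_append_right _ h)
    simp only [pvVarLoop]
    rw [show (g.1 :: g.2) = pvForms g from rfl, h1, Bool.false_and]
    simpa using ih h2

-- A's loop returns false when the second argument is no form of any group
theorem pv_varLoop_false_right (V : List (String × List String)) (j r : String)
    (hr : r ∉ V.flatMap pvForms) : pvVarLoop V j r = false := by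
  induction V with
  | nil => rfl
  | cons g t ih =>
    rw [List.flatMap_cons] at hr
    have h1 : (pvForms g).contains r = false := by
      simp only [List.contains_eq_mem, decide_eq_false_iff_not]
      exact fun h => hr (List.mem_append_left _ h)
    have h2 : r ∉ t.flatMap pvForms := fun h => hr (List.mem_append_right _ h)
    simp only [pvVarLoop]
    rw [show (g.1 :: g.2) = pvForms g from rfl, h1, Bool.and_false]
    simpa using ih h2

-- main bridge: on a table whose forms are all distinct, A's loop equals B's double lookup
theorem pv_varLoop_eq_lookup (V : List (String × List String))
    (hnd : (V.flatMap pvForms).Nodup) (j r : String) :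
    pvVarLoop V j r =
      (match List.lookup j (V.flatMap pvSeg) with
       | none => false
       | some g => List.lookup r (V.flatMap pvSeg) == some g) := by
  induction V with
  | nil => rfl
  | cons g t ih =>
    rw [List.flatMap_cons] at hnd
    have hdisj : (pvForms g).Disjoint (t.flatMap pvForms) := List.disjoint_of_nodup_append hnd
    have hndt : (t.flatMap pvForms).Nodup := (List.nodup_append.mp hnd).2.1
    have hseg : pvSeg g = (pvForms g).map (fun f => (f, g.1)) := rfl
    rw [List.flatMap_cons, hseg]
    simp only [pvVarLoop]
    rw [show (g.1 :: g.2) = pvForms g from rfl]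
    by_cases hj : j ∈ pvForms g <;> by_cases hr : r ∈ pvForms g
    · -- both in the head group: loop hits, both lookups give g.1
      have cj : (pvForms g).contains j = true := by
        simp only [List.contains_eq_mem, decide_eq_true_eq]; exact hj
      have cr : (pvForms g).contains r = true := by
        simp only [List.contains_eq_mem, decide_eq_true_eq]; exact hr
      rw [pv_lookup_seg_mem _ _ _ _ hj, pv_lookup_seg_mem _ _ _ _ hr, cj, cr]
      simp
    · -- j in head, r not: loop false; lookup r (if any) names a tail form ≠ g.1
      have cr : (pvForms g).contains r = false := by
        simp only [List.contains_eq_mem, decide_eq_false_iff_not]; exact hr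
      have hjt : j ∉ t.flatMap pvForms := fun h => hdisj hj h
      rw [pv_lookup_seg_mem _ _ _ _ hj, pv_lookup_seg_not_mem _ _ _ _ hr, cr, Bool.and_false]
      simp only [Bool.false_eq_true, if_false]
      rw [pv_varLoop_false_left t j r hjt]
      cases hlr : List.lookup r (t.flatMap pvSeg) with
      | none => rfl
      | some k =>
        have hk : k ∈ t.flatMap pvForms := pv_lookup_val_mem t r k hlr
        have hne : k ≠ g.1 := fun h => hdisj (List.mem_cons_self ..) (h ▸ hk)
        simp [hne]
    · -- r in head, j not: symmetric
      have cj : (pvForms g).contains j = false := by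
        simp only [List.contains_eq_mem, decide_eq_false_iff_not]; exact hj
      have hrt : r ∉ t.flatMap pvForms := fun h => hdisj hr h
      rw [pv_lookup_seg_mem _ _ _ _ hr, pv_lookup_seg_not_mem _ _ _ _ hj, cj, Bool.false_and]
      simp only [Bool.false_eq_true, if_false]
      rw [pv_varLoop_false_right t j r hrt]
      cases hlj : List.lookup j (t.flatMap pvSeg) with
      | none => rfl
      | some k =>
        have hk : k ∈ t.flatMap pvForms := pv_lookup_val_mem t j k hlj
        have hne : g.1 ≠ k := fun h => hdisj (List.mem_cons_self ..) (h ▸ hk)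
        simp [hne]
    · -- neither in head: skip the segment on both sides, apply IH
      have cj : (pvForms g).contains j = false := by
        simp only [List.contains_eq_mem, decide_eq_false_iff_not]; exact hj
      rw [pv_lookup_seg_not_mem _ _ _ _ hj, pv_lookup_seg_not_mem _ _ _ _ hr, cj, Bool.false_and]
      simp only [Bool.false_eq_true, if_false]
      exact ih hndt

theorem pv_isIn_self (s : String) : PySem.Str.isIn s s = true := by
  rw [PySem.Str.isIn_iff_infix]

-- the two bodies agree for any (already normalized) pair of strings
theorem pv_core (j r : String) :
    (if (j == r) = true then true
     else if (PySem.Str.isIn j r || PySem.Str.isIn r j) = true then true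
     else pvVarLoop pvVariations j r)
    = (if (PySem.Str.isIn j r || PySem.Str.isIn r j) = true then true
       else match List.lookup j pvGroup with
            | none => false
            | some g => List.lookup r pvGroup == some g) := by
  by_cases heq : j = r
  · subst heq
    rw [pv_isIn_self j, Bool.true_or]
    simp
  · rw [if_neg (by simpa using heq)]
    by_cases hc : (PySem.Str.isIn j r || PySem.Str.isIn r j) = true
    · rw [if_pos hc, if_pos hc]
    · rw [if_neg hc, if_neg hc]
      have hnd : (pvVariations.flatMap pvForms).Nodup := by decide
      exact pv_varLoop_eq_lookup pvVariations hnd j r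

-- ===== VERDICT (by name: the statement is the Claim_ definition above) =====
theorem skill_matches_py_spec : Claim_equal_skill_matches_py := by
  intro job_skill resume_skill _
  exact pv_core (PySem.Str.strip (PySem.Str.lower job_skill)) (PySem.Str.strip (PySem.Str.lower resume_skill))
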